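-- pv_equiv track=rewrite | github.com/hikingout/2023-AdventofCode | answers/aoc23_12_03_P2.py | potential_parts
-- ===== SOURCE A (Python) =====
-- def potential_parts(puzzle, neighbors):
--     potential_parts_dict = {}
--     rows = len(puzzle)
--     cols = len(puzzle[0]) if puzzle else 0
--
--     for y in range(rows):
--         number = ''
--         for x in range(cols):
--             if puzzle[y][x].isdigit():
--                 number += puzzle[y][x]
--             elif number:
--                 coord = (y, x - len(number))
--                 if number not in potential_parts_dict:
--                     potential_parts_dict[number] = [coord]
--                 else:
--                     if coord not in potential_parts_dict[number]:
--                         potential_parts_dict[number].append(coord)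
--                 number = ''
--         if number:  # Catch any number that ends at the row's end
--             coord = (y, cols - len(number))
--             if number not in potential_parts_dict:
--                 potential_parts_dict[number] = [coord]
--             else:
--                 if coord not in potential_parts_dict[number]:
--                     potential_parts_dict[number].append(coord)
--
--     return potential_parts_dict
-- ===== SOURCE B (Python) =====
-- def _digit_runs(s):
--     # list of (start, run) for each maximal contiguous digit run in s
--     runs = []
--     i, n = 0, len(s)
--     while i < n:
--         if s[i].isdigit():
--             j = i + 1
--             while j < n and s[j].isdigit():
--                 j += 1
--             runs.append((i, s[i:j]))
--             i = j
--         else: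
--             i += 1
--     return runs
--
--
-- def potential_parts(puzzle, neighbors):
--     parts = {}
--     cols = len(puzzle[0]) if puzzle else 0
--     for y, row in enumerate(puzzle):
--         for start, num in _digit_runs(row[:cols]):
--             coords = parts.setdefault(num, [])
--             if (y, start) not in coords:
--                 coords.append((y, start))
--     return parts
-- ===== Notes on version B (the rewrite author's own statement) =====
-- stated objective: idiomatic
-- what changed: Replaced A's per-character accumulator state machine with its separate end-of-row flush branch by a per-row maximal-digit-run extractor (index-jumping scan yielding (start, run) pairs) folded into the dict with setdefault.
import Mathlib
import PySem

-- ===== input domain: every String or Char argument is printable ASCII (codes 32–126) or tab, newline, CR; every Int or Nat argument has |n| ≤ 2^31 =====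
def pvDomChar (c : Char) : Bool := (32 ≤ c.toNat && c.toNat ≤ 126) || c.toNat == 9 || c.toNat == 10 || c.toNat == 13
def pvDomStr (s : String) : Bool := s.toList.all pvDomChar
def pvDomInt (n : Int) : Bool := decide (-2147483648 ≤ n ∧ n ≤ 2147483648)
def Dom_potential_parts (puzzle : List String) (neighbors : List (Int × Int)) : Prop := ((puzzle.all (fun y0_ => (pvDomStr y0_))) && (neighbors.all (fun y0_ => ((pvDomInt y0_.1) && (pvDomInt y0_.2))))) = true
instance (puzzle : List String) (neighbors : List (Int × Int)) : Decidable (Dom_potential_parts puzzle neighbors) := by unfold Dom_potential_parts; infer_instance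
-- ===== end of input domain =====

-- B replaces A's per-character accumulator state machine (with its end-of-row flush branch)
-- by a per-row maximal-digit-run extractor; equal return values wherever A returns (Pre_).

-- ===== PORT A =====
-- A's duplicated create-or-append block ('if number not in dict … else if coord not in …')
def pvInsA (d : PySem.Dict String (List (Int × Int))) (number : String) (coord : Int × Int) :
    PySem.Dict String (List (Int × Int)) :=
  match d.get? number with
  | none => d.insert number [coord]
  | some lst => if coord ∈ lst then d else d.insert number (lst ++ [coord])

-- one step of A's inner 'for x in range(cols)' loop; state = (dict, number)
def pvStepA (row : List Char) (y : Int)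
    (st : PySem.Dict String (List (Int × Int)) × List Char) (x : Int) :
    PySem.Dict String (List (Int × Int)) × List Char :=
  let ch := (PySem.List.pyGet? row x).getD ' '   -- puzzle[y][x]; in range for every input Pre_ admits
  if PySem.Chars.isdigit ch then (st.1, st.2 ++ [ch])
  else if st.2 ≠ [] then (pvInsA st.1 (String.ofList st.2) (y, x - (st.2.length : Int)), [])
  else st

-- A's body for one row y, including the end-of-row flush
def pvRowA (cols : Int) (d : PySem.Dict String (List (Int × Int))) (y : Int) (row : List Char) :
    PySem.Dict String (List (Int × Int)) :=
  let res := (PySem.List.pyRange 0 cols 1).foldl (pvStepA row y) (d, [])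
  if res.2 ≠ [] then pvInsA res.1 (String.ofList res.2) (y, cols - (res.2.length : Int)) else res.1

def potential_parts (puzzle : List String) (neighbors : List (Int × Int)) :
    List (String × List (Int × Int)) :=
  let cols : Int := if puzzle.isEmpty then 0 else ((puzzle.headD "").toList.length : Int)
  ((PySem.List.enumerate puzzle).foldl (fun d p => pvRowA cols d p.1 p.2.toList)
    PySem.Dict.empty).items

-- ===== PORT B =====
-- Source B's _digit_runs: (start, run) for each maximal contiguous digit run.
-- The outer 'while i < n' advances i by at least 1, so it runs at most len(s) times:
-- the fuel argument of pvRunsGo is that bound, making the index-jumping scan structural (exact).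
-- The inner 'while j < n and s[j].isdigit()' scan is the takeWhile/dropWhile split at i.
def pvRunsGo : Nat → List Char → Int → List (Int × List Char)
  | 0, _, _ => []
  | _ + 1, [], _ => []
  | n + 1, c :: cs, i =>
    if PySem.Chars.isdigit c then
      let t := cs.takeWhile PySem.Chars.isdigit
      (i, c :: t) :: pvRunsGo n (cs.dropWhile PySem.Chars.isdigit) (i + 1 + (t.length : Int))
    else pvRunsGo n cs (i + 1)

def pvRuns (cs : List Char) (i : Int) : List (Int × List Char) := pvRunsGo cs.length cs i

-- Source B's dict update: setdefault + guarded in-place append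
def pvInsB (d : PySem.Dict String (List (Int × Int))) (num : String) (coord : Int × Int) :
    PySem.Dict String (List (Int × Int)) :=
  let d' := d.setdefault num []
  if coord ∈ d'.getD num [] then d' else d'.modify num [] (· ++ [coord])

def potential_parts_alt (puzzle : List String) (neighbors : List (Int × Int)) :
    List (String × List (Int × Int)) :=
  let cols : Nat := if puzzle.isEmpty then 0 else (puzzle.headD "").toList.length
  ((PySem.List.enumerate puzzle).foldl
    (fun d p => (pvRuns (p.2.toList.take cols) 0).foldl   -- row[:cols] (cols ≥ 0), then each run
       (fun d sr => pvInsB d (String.ofList sr.2) (p.1, sr.1)) d)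
    PySem.Dict.empty).items

-- ===== PRECONDITION & SPEC =====
-- Pre_ excludes exactly the puzzles with a row shorter than the first row, on which A raises IndexError.
def Pre_potential_parts (puzzle : List String) (neighbors : List (Int × Int)) : Prop :=
  ∀ s ∈ puzzle, (puzzle.headD "").toList.length ≤ s.toList.length
instance (puzzle : List String) (neighbors : List (Int × Int)) :
    Decidable (Pre_potential_parts puzzle neighbors) := by unfold Pre_potential_parts; infer_instance

def pvWitness_potential_parts : List String × (List (Int × Int)) :=
  (["617.", ".1.2", "...4"], [(0, 1)])

def Spec_potential_parts (puzzle : List String) (neighbors : List (Int × Int))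
    (out : List (String × List (Int × Int))) : Prop := out = potential_parts_alt puzzle neighbors
instance (puzzle : List String) (neighbors : List (Int × Int))
    (out : List (String × List (Int × Int))) : Decidable (Spec_potential_parts puzzle neighbors out) := by
  unfold Spec_potential_parts; infer_instance

-- ===== CLAIM (what is proved, stated in full; the proofs are below) =====
def Claim_equal_potential_parts : Prop := ∀ (puzzle : List String) (neighbors : List (Int × Int)), Dom_potential_parts puzzle neighbors → Pre_potential_parts puzzle neighbors → Spec_potential_parts puzzle neighbors (potential_parts puzzle neighbors)


-- ===== LEMMAS AND PROOFS =====

-- pvInsB and pvInsA build the same dict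
theorem pvInsB_eq_insA (d : PySem.Dict String (List (Int × Int))) (k : String) (c : Int × Int) :
    pvInsB d k c = pvInsA d k c := by
  unfold pvInsA pvInsB
  cases h : d.get? k with
  | none =>
      have hc : d.contains k = false := by
        rw [PySem.Dict.contains_eq_isSome_get?, h]; rfl
      simp [PySem.Dict.setdefault_of_not_contains _ _ hc, PySem.Dict.getD_insert_self,
        PySem.Dict.modify, PySem.Dict.insert_insert_self]
  | some lst =>
      have hc : d.contains k = true := by
        rw [PySem.Dict.contains_eq_isSome_get?, h]; rfl
      have hD : d.getD k [] = lst := PySem.Dict.getD_of_get?_eq_some _ [] h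
      simp [PySem.Dict.setdefault_of_contains _ _ hc, hD, PySem.Dict.modify]

-- unfolding equations for pvRuns (fuel only ever needs to cover the remaining length)
theorem pvRunsGo_fuel : ∀ (n : Nat) (cs : List Char) (i : Int), cs.length ≤ n →
    pvRunsGo n cs i = pvRuns cs i := by
  intro n
  induction n using Nat.strong_induction_on with
  | _ n ih =>
    intro cs i h
    cases cs with
    | nil => cases n <;> rfl
    | cons c cs =>
      cases n with
      | zero => simp at h
      | succ n =>
        simp only [List.length_cons] at h
        by_cases hc : PySem.Chars.isdigit c = true
        · simp only [pvRunsGo, pvRuns, List.length_cons, hc, if_true]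
          rw [ih n (by omega) _ _ (le_trans (cs.length_dropWhile_le _) (by omega)),
              ih cs.length (by omega) _ _ (cs.length_dropWhile_le _)]
        · have hcf : PySem.Chars.isdigit c = false := by simpa using hc
          simp only [pvRunsGo, pvRuns, List.length_cons, hcf, Bool.false_eq_true, if_false]
          rw [ih n (by omega) _ _ (by omega), ih cs.length (by omega) _ _ le_rfl]

theorem pvRuns_nil (i : Int) : pvRuns [] i = [] := rfl

theorem pvRuns_cons_neg {c : Char} (h : PySem.Chars.isdigit c = false) (cs : List Char) (i : Int) :
    pvRuns (c :: cs) i = pvRuns cs (i + 1) := by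
  simp [pvRuns, pvRunsGo, h]

theorem pvRuns_cons_pos {c : Char} (h : PySem.Chars.isdigit c = true) (cs : List Char) (i : Int) :
    pvRuns (c :: cs) i = (i, c :: cs.takeWhile PySem.Chars.isdigit) ::
      pvRuns (cs.dropWhile PySem.Chars.isdigit)
        (i + 1 + ((cs.takeWhile PySem.Chars.isdigit).length : Int)) := by
  simp only [pvRuns, pvRunsGo, List.length_cons, h, if_true]
  rw [pvRunsGo_fuel _ _ _ (cs.length_dropWhile_le _)]
  rfl

-- A's inner state machine, recursion on the remaining characters
def pvMach (y : Int) : List Char → Int → (PySem.Dict String (List (Int × Int)) × List Char) →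
    PySem.Dict String (List (Int × Int)) × List Char
  | [], _, st => st
  | c :: cs, x, st =>
    pvMach y cs (x + 1)
      (if PySem.Chars.isdigit c then (st.1, st.2 ++ [c])
       else if st.2 ≠ [] then (pvInsA st.1 (String.ofList st.2) (y, x - (st.2.length : Int)), [])
       else st)

def pvFlushA (y endx : Int) (st : PySem.Dict String (List (Int × Int)) × List Char) :
    PySem.Dict String (List (Int × Int)) :=
  if st.2 ≠ [] then pvInsA st.1 (String.ofList st.2) (y, endx - (st.2.length : Int)) else st.1

-- bridge: A's indexed range-loop is pvMach on the characters it reads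
theorem pvRange_foldl_eq_mach (y : Int) (cs : List Char) :
    ∀ (pre rest : List Char) st,
      (PySem.List.pyRange (pre.length : Int) ((pre.length : Int) + (cs.length : Int)) 1).foldl
        (pvStepA (pre ++ cs ++ rest) y) st = pvMach y cs (pre.length : Int) st := by
  induction cs with
  | nil => intro pre rest st; simp [PySem.List.pyRange_one_eq_nil, pvMach]
  | cons c cs ih =>
      intro pre rest st
      have hlt : (pre.length : Int) < (pre.length : Int) + (((c :: cs).length : Nat) : Int) := by
        push_cast [List.length_cons]; omega
      rw [PySem.List.pyRange_one_cons hlt, List.foldl_cons]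
      have hget : PySem.List.pyGet? (pre ++ c :: cs ++ rest) (pre.length : Int) = some c := by
        rw [show pre ++ c :: cs ++ rest = pre ++ c :: (cs ++ rest) by simp]
        exact PySem.List.pyGet?_append_length pre (cs ++ rest) c
      have hstep : pvStepA (pre ++ c :: cs ++ rest) y st (pre.length : Int) =
          (if PySem.Chars.isdigit c then (st.1, st.2 ++ [c])
           else if st.2 ≠ [] then
             (pvInsA st.1 (String.ofList st.2) (y, (pre.length : Int) - (st.2.length : Int)), [])
           else st) := by
        simp only [pvStepA, hget]
        rfl
      rw [hstep]
      have h3 := ih (pre ++ [c]) rest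
          (if PySem.Chars.isdigit c then (st.1, st.2 ++ [c])
           else if st.2 ≠ [] then
             (pvInsA st.1 (String.ofList st.2) (y, (pre.length : Int) - (st.2.length : Int)), [])
           else st)
      simp only [List.length_append, List.length_singleton] at h3
      push_cast [List.length_cons] at h3 ⊢
      rw [show ((pre.length : Int) + 1) + (cs.length : Int) =
            (pre.length : Int) + ((cs.length : Int) + 1) by ring] at h3
      rw [show pre ++ [c] ++ cs ++ rest = pre ++ c :: cs ++ rest by simp] at h3
      rw [h3, pvMach]

theorem pvTakeWhile_all {p : Char → Bool} {l : List Char} (h : ∀ x ∈ l, p x = true)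
    (c : Char) (hc : p c = false) (r : List Char) :
    (l ++ c :: r).takeWhile p = l ∧ (l ++ c :: r).dropWhile p = c :: r := by
  induction l with
  | nil => simp [List.takeWhile, List.dropWhile, hc]
  | cons a l ih =>
      have ha := h a (by simp)
      have := ih (fun x hx => h x (by simp [hx]))
      simp [List.takeWhile_cons, List.dropWhile_cons, ha, this.1, this.2]

-- core: the state machine plus end flush ≡ fold over the digit runs
theorem pvMach_eq_runs (y : Int) (cs : List Char) :
    ∀ (x0 : Int) d num, (∀ c ∈ num, PySem.Chars.isdigit c = true) →
      pvFlushA y (x0 + (cs.length : Int)) (pvMach y cs x0 (d, num)) =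
      (pvRuns (num ++ cs) (x0 - (num.length : Int))).foldl
        (fun d sr => pvInsA d (String.ofList sr.2) (y, sr.1)) d := by
  induction cs with
  | nil =>
      intro x0 d num hnum
      cases num with
      | nil => simp [pvMach, pvFlushA, pvRuns, pvRunsGo]
      | cons n0 nt =>
          have h0 := hnum n0 (by simp)
          have htw : nt.takeWhile PySem.Chars.isdigit = nt :=
            List.takeWhile_eq_self_iff.mpr (fun x hx => hnum x (by simp [hx]))
          have hdw : nt.dropWhile PySem.Chars.isdigit = [] :=
            List.dropWhile_eq_nil_iff.mpr (fun x hx => hnum x (by simp [hx]))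
          rw [List.append_nil, pvRuns_cons_pos h0, htw, hdw, pvRuns_nil]
          simp only [pvMach, pvFlushA, ne_eq, reduceCtorEq, not_false_eq_true, if_true,
            List.foldl_cons, List.foldl_nil, List.length_cons, List.length_nil, Nat.cast_zero]
          push_cast
          ring_nf
  | cons c cs ih =>
      intro x0 d num hnum
      by_cases hc : PySem.Chars.isdigit c = true
      · have hnum' : ∀ a ∈ num ++ [c], PySem.Chars.isdigit a = true := by
          intro a ha; rcases List.mem_append.mp ha with h | h
          · exact hnum a h
          · simp at h; subst h; exact hc
        have h3 := ih (x0 + 1) d (num ++ [c]) hnum'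
        simp only [pvMach, hc, if_true, List.length_cons, List.length_append,
          List.length_singleton, List.length_nil] at h3 ⊢
        push_cast at h3 ⊢
        rw [show x0 + ((cs.length : Int) + 1) = (x0 + 1) + (cs.length : Int) by ring]
        rw [show x0 + 1 - ((num.length : Int) + 1) = x0 - (num.length : Int) by ring] at h3
        rw [show num ++ [c] ++ cs = num ++ c :: cs by simp] at h3
        exact h3
      · have hcf : PySem.Chars.isdigit c = false := by simpa using hc
        cases num with
        | nil =>
            have h3 := ih (x0 + 1) d [] (by simp)
            simp only [pvMach, hcf, Bool.false_eq_true, if_false, ne_eq, not_true_eq_false,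
              List.nil_append, List.length_cons, List.length_nil, Nat.cast_zero] at h3 ⊢
            rw [pvRuns_cons_neg hcf]
            push_cast at h3 ⊢
            rw [show x0 + ((cs.length : Int) + 1) = (x0 + 1) + (cs.length : Int) by ring]
            rw [show x0 - (0 : Int) + 1 = x0 + 1 by ring]
            rw [show x0 + 1 - (0 : Int) = x0 + 1 by ring] at h3
            exact h3
        | cons n0 nt =>
            have h0 := hnum n0 (by simp)
            have hsplit := pvTakeWhile_all (p := PySem.Chars.isdigit)
              (l := nt) (fun x hx => hnum x (by simp [hx])) c hcf cs
            have h3 := ih (x0 + 1)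
              (pvInsA d (String.ofList (n0 :: nt)) (y, x0 - (((n0 :: nt).length : Nat) : Int))) []
              (by simp)
            simp only [pvMach, hcf, Bool.false_eq_true, if_false, ne_eq, reduceCtorEq,
              not_false_eq_true, if_true, List.nil_append, List.length_nil, Nat.cast_zero,
              List.length_cons] at h3 ⊢
            rw [show (n0 :: nt) ++ c :: cs = n0 :: (nt ++ c :: cs) by simp, pvRuns_cons_pos h0]
            rw [hsplit.1, hsplit.2, List.foldl_cons, pvRuns_cons_neg hcf]
            push_cast at h3 ⊢
            rw [show x0 + ((cs.length : Int) + 1) = (x0 + 1) + (cs.length : Int) by ring]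
            rw [show x0 - ((nt.length : Int) + 1) + 1 + (nt.length : Int) + 1 = x0 + 1 by ring]
            rw [show x0 + 1 - (0 : Int) = x0 + 1 by ring] at h3
            exact h3

-- per row: A's loop body equals B's run fold, whenever the row is at least cols long
theorem pvRowA_eq_runs (y : Int) (d : PySem.Dict String (List (Int × Int)))
    (row : List Char) (n : Nat) (h : n ≤ row.length) :
    pvRowA (n : Int) d y row =
      (pvRuns (row.take n) 0).foldl (fun d sr => pvInsA d (String.ofList sr.2) (y, sr.1)) d := by
  have hlen : (row.take n).length = n := by simp [List.length_take, Nat.min_eq_left h]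
  have hb := pvRange_foldl_eq_mach y (row.take n) [] (row.drop n) (d, [])
  simp only [List.length_nil, Nat.cast_zero, List.nil_append, List.take_append_drop,
    hlen, zero_add] at hb
  have hm := pvMach_eq_runs y (row.take n) 0 d [] (by simp)
  simp only [List.nil_append, List.length_nil, Nat.cast_zero, zero_add, sub_zero, hlen] at hm
  unfold pvRowA pvFlushA at *
  rw [hb]
  exact hm

-- ===== VERDICT (by name: the statement is the Claim_ definition above) =====
theorem potential_parts_spec : Claim_equal_potential_parts := by
  intro puzzle neighbors _ hpre
  unfold Spec_potential_parts potential_parts potential_parts_alt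
  dsimp only
  congr 1
  apply PySem.List.foldl_congr_mem
  intro d p hp
  rcases (PySem.List.mem_enumerate_iff _ _ _).mp hp with ⟨k, hk, rfl⟩
  have hmem : puzzle[k] ∈ puzzle := List.getElem_mem hk
  have hle : (puzzle.headD "").toList.length ≤ puzzle[k].toList.length := hpre _ hmem
  have hne : ¬ puzzle.isEmpty := by
    cases puzzle with
    | nil => simp at hk
    | cons a l => simp
  simp only [hne, if_false, Bool.false_eq_true]
  rw [pvRowA_eq_runs _ _ _ _ hle]
  apply PySem.List.foldl_congr_mem
  intro d' sr _
  rw [pvInsB_eq_insA]
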